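-- pv_equiv track=rewrite | github.com/mie-h/cs61a-cats | typing.py | edit_diff
-- ===== SOURCE A (Python) =====
-- def edit_diff(start, goal, limit):
--     """A diff function that computes the edit distance from START to GOAL."""
--
--     if limit == -1:
--         return 0
--     if len(start) == 0 or len(goal) == 0: # Fill in the condition
--         # BEGIN
--         "*** YOUR CODE HERE ***"
--         return max(len(start), len(goal))
--         # END
--     elif start[0] == goal[0]: # Feel free to remove or add additional cases
--         # BEGIN
--         "*** YOUR CODE HERE ***"
--         return edit_diff(start[1:], goal[1:], limit)
--         # END
--     else:
--         add_diff = 1 + edit_diff(start, goal[1:], limit-1)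
--         remove_diff =  1 + edit_diff(start[1:], goal, limit-1)
--         substitute_diff = 1 + edit_diff(start[1:], goal[1:], limit-1)
--         # BEGIN
--         "*** YOUR CODE HERE ***"
--         return min(add_diff, remove_diff, substitute_diff)
-- ===== SOURCE B (Python) =====
-- def edit_diff(start, goal, limit):
--     """A diff function that computes the edit distance from START to GOAL."""
--     return _ed(start, goal, limit, {})
--
--
-- def _ed(start, goal, limit, memo):
--     if limit == -1:
--         return 0
--     if len(start) == 0 or len(goal) == 0:
--         return max(len(start), len(goal))
--     key = (start, goal, limit)
--     if key in memo:
--         return memo[key]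
--     if start[0] == goal[0]:
--         result = _ed(start[1:], goal[1:], limit, memo)
--     else:
--         result = 1 + min(_ed(start, goal[1:], limit - 1, memo),
--                          _ed(start[1:], goal, limit - 1, memo),
--                          _ed(start[1:], goal[1:], limit - 1, memo))
--     memo[key] = result
--     return result
-- ===== Notes on version B (the rewrite author's own statement) =====
-- stated objective: faster
-- what changed: Replaced the naive exponential three-way recursion by a memoized recursion (dynamic programming) keyed on the (start suffix, goal suffix, limit) state, so each subproblem is solved once.
import Mathlib
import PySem

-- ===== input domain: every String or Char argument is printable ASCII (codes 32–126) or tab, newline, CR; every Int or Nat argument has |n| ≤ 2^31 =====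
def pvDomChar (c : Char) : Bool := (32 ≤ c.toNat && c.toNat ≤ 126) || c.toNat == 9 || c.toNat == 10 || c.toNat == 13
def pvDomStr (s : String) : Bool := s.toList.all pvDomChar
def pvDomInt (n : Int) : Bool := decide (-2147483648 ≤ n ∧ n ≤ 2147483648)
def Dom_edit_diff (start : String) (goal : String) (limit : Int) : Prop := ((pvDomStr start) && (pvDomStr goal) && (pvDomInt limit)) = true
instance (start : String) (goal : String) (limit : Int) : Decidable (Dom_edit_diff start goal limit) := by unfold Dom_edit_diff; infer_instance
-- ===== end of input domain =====

-- B memoizes the budgeted recursion on the (start suffix, goal suffix, limit) state: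
-- dynamic programming instead of naive exponential recursion (each subproblem solved once).

-- ===== PORT A =====
-- A's recursion, transliterated over the strings' character lists (start[1:] = tail).
def editDiffA (s g : List Char) (l : Int) : Int :=
  if l = -1 then 0
  else if h : s.length = 0 ∨ g.length = 0 then
    ((max s.length g.length : Nat) : Int)
  else if s.head? = g.head? then
    editDiffA s.tail g.tail l
  else
    let add_diff := 1 + editDiffA s g.tail (l - 1)
    let remove_diff := 1 + editDiffA s.tail g (l - 1)
    let substitute_diff := 1 + editDiffA s.tail g.tail (l - 1)
    min add_diff (min remove_diff substitute_diff)
termination_by s.length + g.length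
decreasing_by
  · push Not at h; simp [List.length_tail]; omega
  · push Not at h; simp [List.length_tail]; omega
  · push Not at h; simp [List.length_tail]; omega
  · push Not at h; simp [List.length_tail]; omega

def edit_diff (start : String) (goal : String) (limit : Int) : Int :=
  editDiffA start.toList goal.toList limit

-- ===== PORT B =====
-- B's helper _ed: the memoized recursion; the dict Python mutates in place is threaded explicitly.
def edB (s g : List Char) (l : Int) (memo : PySem.Dict (List Char × List Char × Int) Int) :
    Int × PySem.Dict (List Char × List Char × Int) Int :=
  if l = -1 then (0, memo)
  else if h : s = [] ∨ g = [] then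
    (((max s.length g.length : Nat) : Int), memo)
  else
    match memo.get? (s, g, l) with
    | some r => (r, memo)
    | none =>
      let p : Int × PySem.Dict (List Char × List Char × Int) Int :=
        if s.head? = g.head? then
          edB s.tail g.tail l memo
        else
          let qa := edB s g.tail (l - 1) memo
          let qb := edB s.tail g (l - 1) qa.2
          let qc := edB s.tail g.tail (l - 1) qb.2
          (1 + min qa.1 (min qb.1 qc.1), qc.2)
      (p.1, p.2.insert (s, g, l) p.1)
termination_by s.length + g.length
decreasing_by
  · rcases (not_or.mp h) with ⟨hs, hg⟩
    cases s with | nil => exact absurd rfl hs | cons x xs => cases g with | nil => exact absurd rfl hg | cons y ys => simp; omega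
  · rcases (not_or.mp h) with ⟨-, hg⟩
    cases g with | nil => exact absurd rfl hg | cons y ys => simp
  · rcases (not_or.mp h) with ⟨hs, -⟩
    cases s with | nil => exact absurd rfl hs | cons x xs => simp
  · rcases (not_or.mp h) with ⟨hs, hg⟩
    cases s with | nil => exact absurd rfl hs | cons x xs => cases g with | nil => exact absurd rfl hg | cons y ys => simp; omega

def edit_diff_alt (start : String) (goal : String) (limit : Int) : Int :=
  (edB start.toList goal.toList limit PySem.Dict.empty).1

-- ===== PRECONDITION & SPEC =====
def Spec_edit_diff (start : String) (goal : String) (limit : Int) (out : Int) : Prop := out = edit_diff_alt start goal limit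
instance (start : String) (goal : String) (limit : Int) (out : Int) : Decidable (Spec_edit_diff start goal limit out) := by unfold Spec_edit_diff; infer_instance

-- ===== CLAIM =====
def Claim_equal_edit_diff : Prop := ∀ (start : String) (goal : String) (limit : Int), Dom_edit_diff start goal limit → Spec_edit_diff start goal limit (edit_diff start goal limit)

-- ===== LEMMAS AND PROOFS =====

-- a memo is good if every stored entry is the value A's recursion computes at that state
def GoodMemo (d : PySem.Dict (List Char × List Char × Int) Int) : Prop :=
  ∀ s g l r, d.get? (s, g, l) = some r → r = editDiffA s g l

theorem good_insert {d : PySem.Dict (List Char × List Char × Int) Int}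
    (hd : GoodMemo d) (s g : List Char) (l : Int) {r : Int} (hr : r = editDiffA s g l) :
    GoodMemo (d.insert (s, g, l) r) := by
  intro s' g' l' v hv
  rw [PySem.Dict.get?_insert] at hv
  split at hv
  · next heq =>
    obtain ⟨h1, h2, h3⟩ : s' = s ∧ g' = g ∧ l' = l := by simpa [Prod.ext_iff] using heq
    subst h1; subst h2; subst h3
    cases hv
    exact hr
  · exact hd _ _ _ _ hv

theorem edB_correct : ∀ (n : Nat) (s g : List Char) (l : Int)
    (d : PySem.Dict (List Char × List Char × Int) Int),
    s.length + g.length = n → GoodMemo d →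
    (edB s g l d).1 = editDiffA s g l ∧ GoodMemo (edB s g l d).2 := by
  intro n
  induction n using Nat.strong_induction_on with
  | _ n ih =>
  intro s g l d hn hd
  by_cases hl : l = -1
  · rw [edB, editDiffA]
    simp only [if_pos hl]
    exact ⟨trivial, hd⟩
  · by_cases hsg : s = [] ∨ g = []
    · have hsg' : s.length = 0 ∨ g.length = 0 := by simpa [List.length_eq_zero_iff] using hsg
      rw [edB, editDiffA]
      simp only [if_neg hl, dif_pos hsg, dif_pos hsg']
      exact ⟨trivial, hd⟩
    · have hs : s ≠ [] := fun h => hsg (Or.inl h)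
      have hg : g ≠ [] := fun h => hsg (Or.inr h)
      have hsg' : ¬ (s.length = 0 ∨ g.length = 0) := by simpa [List.length_eq_zero_iff] using hsg
      have hslen : 0 < s.length := by cases s with | nil => exact absurd rfl hs | cons x xs => simp
      have hglen : 0 < g.length := by cases g with | nil => exact absurd rfl hg | cons y ys => simp
      cases hget : d.get? (s, g, l) with
      | some v =>
        rw [edB]
        simp only [if_neg hl, dif_neg hsg, hget]
        exact ⟨hd _ _ _ _ hget, hd⟩
      | none =>
        by_cases hhd : s.head? = g.head?
        · obtain ⟨h1, hd1⟩ := ih (s.tail.length + g.tail.length)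
            (by simp [List.length_tail]; omega) s.tail g.tail l d rfl hd
          have ha : editDiffA s g l = editDiffA s.tail g.tail l := by
            rw [editDiffA]; simp only [if_neg hl, dif_neg hsg', if_pos hhd]
          rw [edB]
          simp only [if_neg hl, dif_neg hsg, hget, if_pos hhd]
          exact ⟨h1.trans ha.symm, good_insert hd1 s g l (h1.trans ha.symm)⟩
        · obtain ⟨h1, hd1⟩ := ih (s.length + g.tail.length)
            (by simp [List.length_tail]; omega) s g.tail (l - 1) d rfl hd
          obtain ⟨h2, hd2⟩ := ih (s.tail.length + g.length)
            (by simp [List.length_tail]; omega) s.tail g (l - 1) (edB s g.tail (l - 1) d).2 rfl hd1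
          obtain ⟨h3, hd3⟩ := ih (s.tail.length + g.tail.length)
            (by simp [List.length_tail]; omega) s.tail g.tail (l - 1)
            (edB s.tail g (l - 1) (edB s g.tail (l - 1) d).2).2 rfl hd2
          have ha : editDiffA s g l =
              min (1 + editDiffA s g.tail (l - 1))
                (min (1 + editDiffA s.tail g (l - 1)) (1 + editDiffA s.tail g.tail (l - 1))) := by
            rw [editDiffA]; simp only [if_neg hl, dif_neg hsg', if_neg hhd]
          have hr : (1 + min (edB s g.tail (l - 1) d).1
                (min (edB s.tail g (l - 1) (edB s g.tail (l - 1) d).2).1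
                  (edB s.tail g.tail (l - 1) (edB s.tail g (l - 1) (edB s g.tail (l - 1) d).2).2).1) : Int)
              = editDiffA s g l := by
            rw [h1, h2, h3, ha]; omega
          rw [edB]
          simp only [if_neg hl, dif_neg hsg, hget, if_neg hhd]
          exact ⟨hr, good_insert hd3 s g l hr⟩

-- ===== VERDICT (by name: the statement is the Claim_ definition above) =====
theorem edit_diff_spec : Claim_equal_edit_diff := by
  intro start goal limit _
  show edit_diff start goal limit = edit_diff_alt start goal limit
  unfold edit_diff edit_diff_alt
  have hempty : GoodMemo PySem.Dict.empty := fun s g l r h => by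
    simp [PySem.Dict.get?_empty] at h
  obtain ⟨hval, -⟩ := edB_correct _ start.toList goal.toList limit PySem.Dict.empty rfl hempty
  exact hval.symm
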